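-- pv_equiv track=rewrite | github.com/alaneos777/club | project euler/284.py | count
-- ===== SOURCE A (Python) =====
-- def count(n):
-- 	lst = []
-- 	while n > 0:
-- 		d = n % 14
-- 		n //= 14
-- 		lst = [d] + lst
-- 	r = 1
-- 	ans = 0
-- 	for d in lst:
-- 		ans += d * r
-- 		if d > 0:
-- 			r += 1
-- 	return ans
-- ===== SOURCE B (Python) =====
-- def count(n):
--     below = 0
--     total = 0
--     extra = 0
--     while n > 0:
--         d = n % 14
--         n //= 14
--         if d > 0:
--             extra += below
--         below += d
--         total += d
--     return total + extra
-- ===== Notes on version B (the rewrite author's own statement) =====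
-- stated objective: simpler
-- what changed: B processes digits LSB-first in a single pass without building or reversing a list, maintaining running sums (total of digits, sum of less-significant digits, and accumulated extra weight) instead of A's two-phase build-list-then-weighted-scan.
import Mathlib
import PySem

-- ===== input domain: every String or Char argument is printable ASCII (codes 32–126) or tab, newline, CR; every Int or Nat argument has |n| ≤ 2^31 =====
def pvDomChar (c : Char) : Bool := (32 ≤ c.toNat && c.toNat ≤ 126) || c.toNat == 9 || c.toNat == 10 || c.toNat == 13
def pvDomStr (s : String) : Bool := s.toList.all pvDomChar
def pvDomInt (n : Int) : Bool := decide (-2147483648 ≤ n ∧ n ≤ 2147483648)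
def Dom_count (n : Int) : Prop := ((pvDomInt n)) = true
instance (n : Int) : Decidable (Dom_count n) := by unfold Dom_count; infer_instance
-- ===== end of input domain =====

-- B replaces A's build-list-then-weighted-scan with a single LSB-first pass keeping running sums (simpler; return value only).

theorem pv_floordiv14_lt (n : Int) (h : 0 < n) :
    (PySem.Int.floordiv n 14).toNat < n.toNat := by
  rw [PySem.Int.floordiv_eq_ediv_of_pos (by norm_num)]
  have h1 : 14 * (n / 14) + n % 14 = n := Int.mul_ediv_add_emod n 14
  have h2 : 0 ≤ n % 14 := Int.emod_nonneg n (by norm_num)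
  have h3 : 0 ≤ n / 14 := Int.ediv_nonneg (le_of_lt h) (by norm_num)
  omega

-- ===== PORT A =====
-- the while loop building lst (prepending each digit)
def countA (n : Int) (lst : List Int) : List Int :=
  if h : 0 < n then
    countA (PySem.Int.floordiv n 14) (PySem.Int.mod n 14 :: lst)
  else lst
termination_by n.toNat
decreasing_by exact pv_floordiv14_lt n h

def count (n : Int) : Int :=
  let lst := countA n []
  (lst.foldl (fun (s : Int × Int) d => (if d > 0 then s.1 + 1 else s.1, s.2 + d * s.1)) (1, 0)).2

-- ===== PORT B =====
-- single LSB-first while loop with three accumulators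
def countB (n below total extra : Int) : Int :=
  if h : 0 < n then
    countB (PySem.Int.floordiv n 14) (below + PySem.Int.mod n 14)
      (total + PySem.Int.mod n 14)
      (extra + if PySem.Int.mod n 14 > 0 then below else 0)
  else total + extra
termination_by n.toNat
decreasing_by exact pv_floordiv14_lt n h

def count_alt (n : Int) : Int := countB n 0 0 0

-- ===== PRECONDITION & SPEC =====
def Spec_count (n : Int) (out : Int) : Prop := out = count_alt n
instance (n : Int) (out : Int) : Decidable (Spec_count n out) := by unfold Spec_count; infer_instance

-- ===== CLAIM (what is proved, stated in full; the proofs are below) =====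
def Claim_equal_count : Prop := ∀ (n : Int), Dom_count n → Spec_count n (count n)

-- ===== LEMMAS AND PROOFS =====

-- digits of n in base 14, least-significant first
def pvDigits (n : Int) : List Int :=
  if h : 0 < n then PySem.Int.mod n 14 :: pvDigits (PySem.Int.floordiv n 14) else []
termination_by n.toNat
decreasing_by exact pv_floordiv14_lt n h

-- A's MSB-first weighted scan, as a pure function of list and starting weight
def scanA : List Int → Int → Int
  | [], _ => 0
  | d :: L, r => d * r + scanA L (if d > 0 then r + 1 else r)

-- B's loop as a pure fold over the digit list
def bfold : List Int → Int → Int → Int → Int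
  | [], _, t, e => t + e
  | d :: ds, b, t, e => bfold ds (b + d) (t + d) (e + if d > 0 then b else 0)

-- number of nonzero digits (as an Int)
def nz : List Int → Int
  | [] => 0
  | d :: L => (if d > 0 then 1 else 0) + nz L

theorem countA_eq (n : Int) (lst : List Int) :
    countA n lst = (pvDigits n).reverse ++ lst := by
  induction n, lst using countA.induct with
  | case1 n lst h ih =>
    rw [countA, pvDigits, dif_pos h, dif_pos h, ih]
    simp
  | case2 n lst h =>
    rw [countA, pvDigits, dif_neg h, dif_neg h]
    simp

theorem countB_eq (n b t e : Int) :
    countB n b t e = bfold (pvDigits n) b t e := by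
  induction n, b, t, e using countB.induct with
  | case1 n b t e h ih =>
    rw [countB, pvDigits, dif_pos h, dif_pos h, bfold]
    exact ih
  | case2 n b t e h =>
    rw [countB, pvDigits, dif_neg h, dif_neg h, bfold]

theorem foldA_eq (L : List Int) : ∀ r a,
    (L.foldl (fun (s : Int × Int) d => (if d > 0 then s.1 + 1 else s.1, s.2 + d * s.1)) (r, a)).2
      = a + scanA L r := by
  induction L with
  | nil => intro r a; simp [scanA]
  | cons d L ih =>
    intro r a
    simp only [List.foldl_cons, scanA, ih]
    split <;> ring

theorem nz_append (L M : List Int) : nz (L ++ M) = nz L + nz M := by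
  induction L with
  | nil => simp [nz]
  | cons d L ih => simp [nz, ih]; ring

theorem nz_reverse (L : List Int) : nz L.reverse = nz L := by
  induction L with
  | nil => rfl
  | cons d L ih => simp [nz, nz_append, ih]; ring

theorem scanA_append_single (L : List Int) (d : Int) : ∀ r,
    scanA (L ++ [d]) r = scanA L r + d * (r + nz L) := by
  induction L with
  | nil => intro r; simp [scanA, nz]; try ring
  | cons c L ih =>
    intro r
    simp only [List.cons_append, scanA, ih, nz]
    split <;> ring

theorem bfold_eq (ds : List Int) : ∀ b t e,
    bfold ds b t e = t + e + b * nz ds + scanA ds.reverse 1 := by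
  induction ds with
  | nil => intro b t e; simp [bfold, nz, scanA]
  | cons d ds ih =>
    intro b t e
    rw [bfold, ih]
    simp only [List.reverse_cons, scanA_append_single, nz, nz_reverse]
    split <;> ring

theorem count_eq_count_alt (n : Int) : count n = count_alt n := by
  rw [count, count_alt, countA_eq, foldA_eq, countB_eq, bfold_eq]
  simp

-- ===== VERDICT (by name: the statement is the Claim_ definition above) =====
theorem count_spec : Claim_equal_count := by
  intro n _
  unfold Spec_count
  exact count_eq_count_alt n
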